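-- pv_equiv track=rewrite | github.com/myles1663/lancelot | src/integrations/telegram_bot.py | _fit_columns
-- ===== SOURCE A (Python) =====
-- def _fit_columns(col_widths: list, max_total: int) -> tuple:
--     """Fit columns within max_total width. Returns (adjusted_widths, n_cols).
--
--     Strategy: include columns left-to-right. If total exceeds max,
--     first shrink the widest columns, then drop rightmost columns.
--     """
--     n = len(col_widths)
--     if n == 0:
--         return [], 0
--
--     # Start with all columns; total = sum(widths) + (n-1) separators
--     total = sum(col_widths) + (n - 1)
--     if total <= max_total:
--         return col_widths, n
--
--     # Phase 1: cap each column to max 12 chars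
--     capped = [min(w, 12) for w in col_widths]
--     total = sum(capped) + (n - 1)
--     if total <= max_total:
--         return capped, n
--
--     # Phase 2: cap each column to max 8 chars
--     capped = [min(w, 8) for w in capped]
--     total = sum(capped) + (n - 1)
--     if total <= max_total:
--         return capped, n
--
--     # Phase 3: drop rightmost columns until it fits
--     for keep in range(n, 0, -1):
--         subset = capped[:keep]
--         total = sum(subset) + (keep - 1)
--         if total <= max_total:
--             return subset, keep
--
--     # Absolute minimum: first column only, truncated
--     return [max_total], 1
-- ===== SOURCE B (Python) =====
-- def _fit_columns(col_widths: list, max_total: int) -> tuple: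
--     """Fit columns within max_total width. Returns (adjusted_widths, n_cols)."""
--     n = len(col_widths)
--     if n == 0:
--         return [], 0
--     ws = col_widths
--     for cap in (12, 8):
--         if sum(ws) + n - 1 <= max_total:
--             return ws, n
--         ws = [min(w, cap) for w in ws]
--     total = sum(ws) + n - 1
--     if total <= max_total:
--         return ws, n
--     # Drop rightmost columns, maintaining a running total.
--     keep = n
--     for w in reversed(ws[1:]):
--         total -= w + 1
--         keep -= 1
--         if total <= max_total:
--             return ws[:keep], keep
--     return [max_total], 1
-- ===== Notes on version B (the rewrite author's own statement) =====
-- stated objective: alternative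
-- what changed: The three cap phases become one loop over the caps (12, 8) and the drop phase keeps a running total, subtracting one column per step in a single backward pass, instead of re-summing every prefix slice.
import Mathlib
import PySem

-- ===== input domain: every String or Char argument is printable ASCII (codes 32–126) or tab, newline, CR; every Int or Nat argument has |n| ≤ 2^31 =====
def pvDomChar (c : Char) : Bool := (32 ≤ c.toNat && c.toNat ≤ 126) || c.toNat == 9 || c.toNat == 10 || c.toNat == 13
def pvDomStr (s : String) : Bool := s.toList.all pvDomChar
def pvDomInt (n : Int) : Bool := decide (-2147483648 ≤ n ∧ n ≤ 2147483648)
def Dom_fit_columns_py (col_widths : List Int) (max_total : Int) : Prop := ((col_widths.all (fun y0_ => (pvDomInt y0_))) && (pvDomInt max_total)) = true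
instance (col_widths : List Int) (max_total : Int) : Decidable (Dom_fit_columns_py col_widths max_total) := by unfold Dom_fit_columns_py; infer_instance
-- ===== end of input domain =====

-- B folds the three cap phases into one loop over the caps and replaces A's drop phase,
-- which re-sums each prefix slice, by a single backward pass maintaining a running total (objective: alternative).


-- ===== PORT A =====
-- A's phase-3 'for keep in range(n, 0, -1)' with early return: first k in the list that fits
def fitLoopA (capped : List Int) (max_total : Int) : List Int → Option (List Int × Int)
  | [] => none
  | k :: rest =>
      let subset := PySem.List.slice capped (some 0) (some k)
      if subset.sum + (k - 1) ≤ max_total then some (subset, k)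
      else fitLoopA capped max_total rest

def fit_columns_py (col_widths : List Int) (max_total : Int) : List Int × Int :=
  let n : Int := col_widths.length
  if col_widths.length = 0 then ([], 0)
  else
    let total := col_widths.sum + (n - 1)
    if total ≤ max_total then (col_widths, n)
    else
      let capped := col_widths.map (fun w => min w 12)
      let total := capped.sum + (n - 1)
      if total ≤ max_total then (capped, n)
      else
        let capped2 := capped.map (fun w => min w 8)
        let total := capped2.sum + (n - 1)
        if total ≤ max_total then (capped2, n)
        else
          match fitLoopA capped2 max_total (PySem.List.pyRange n 0 (-1)) with
          | some r => r
          | none => ([max_total], 1)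

-- ===== PORT B =====
-- B's 'for cap in (12, 8): if fits: return ws, n; ws = [min(w, cap) for w in ws]'
def altPhases (n max_total : Int) : List Int → List Int → (List Int × Int) ⊕ List Int
  | ws, [] => Sum.inr ws
  | ws, cap :: rest =>
      if ws.sum + n - 1 ≤ max_total then Sum.inl (ws, n)
      else altPhases n max_total (ws.map (fun w => min w cap)) rest

-- B's 'for w in reversed(ws[1:]): total -= w + 1; keep -= 1; if total <= max_total: return ws[:keep], keep'
def altDrop (ws : List Int) (max_total : Int) : List Int → Int → Int → List Int × Int
  | [], _, _ => ([max_total], 1)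
  | w :: rest, total, keep =>
      let total' := total - (w + 1)
      let keep' := keep - 1
      if total' ≤ max_total then (PySem.List.slice ws (some 0) (some keep'), keep')
      else altDrop ws max_total rest total' keep'

def fit_columns_py_alt (col_widths : List Int) (max_total : Int) : List Int × Int :=
  let n : Int := col_widths.length
  if col_widths.length = 0 then ([], 0)
  else
    match altPhases n max_total col_widths [12, 8] with
    | Sum.inl r => r
    | Sum.inr ws =>
      let total := ws.sum + n - 1
      if total ≤ max_total then (ws, n)
      else altDrop ws max_total (PySem.List.slice ws (some 1) none).reverse total n

-- ===== PRECONDITION & SPEC =====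
def Spec_fit_columns_py (col_widths : List Int) (max_total : Int) (out : List Int × Int) : Prop := out = fit_columns_py_alt col_widths max_total
instance (col_widths : List Int) (max_total : Int) (out : List Int × Int) : Decidable (Spec_fit_columns_py col_widths max_total out) := by unfold Spec_fit_columns_py; infer_instance

-- ===== CLAIM (what is proved, stated in full; the proofs are below) =====
def Claim_equal_fit_columns_py : Prop := ∀ (col_widths : List Int) (max_total : Int), Dom_fit_columns_py col_widths max_total → Spec_fit_columns_py col_widths max_total (fit_columns_py col_widths max_total)

-- ===== LEMMAS AND PROOFS =====

-- Main drop-phase bridge: for 1 <= k <= ws.length, A's scan over [k-1, ..., 1]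
-- equals B's running-total loop started at state (keep = k, total = sum(ws[:k]) + k - 1).
theorem drop_bridge (ws : List Int) (mt : Int) (k : Nat) (hk1 : 1 ≤ k) (hkn : k ≤ ws.length) :
    (match fitLoopA ws mt (PySem.List.pyRange ((k : Int) - 1) 0 (-1)) with
     | some r => r
     | none => ([mt], 1))
    = altDrop ws mt (PySem.List.slice (ws.take k) (some 1) none).reverse
        ((ws.take k).sum + ((k : Int) - 1)) k := by
  induction k with
  | zero => omega
  | succ k ih =>
    rw [PySem.List.slice_from_one]
    by_cases hk0 : k = 0
    · subst hk0
      have h1 : ((1:Nat) : Int) - 1 = 0 := by norm_num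
      rw [h1, PySem.List.pyRange_neg_one_eq_nil (by norm_num)]
      have : (ws.take 1).tail = [] := by cases ws <;> simp
      rw [this]
      simp [fitLoopA, altDrop]
    · have hk : 1 ≤ k := by omega
      have hlt : k < ws.length := by omega
      have hc : ((k+1 : Nat) : Int) - 1 = (k : Int) := by push_cast; ring
      rw [hc, PySem.List.pyRange_neg_one_cons (by positivity)]
      have htake : ws.take (k+1) = ws.take k ++ [ws[k]] := by
        rw [List.take_add_one]; simp [List.getElem?_eq_getElem hlt]
      have htail : (ws.take (k+1)).tail = (ws.take k).tail ++ [ws[k]] := by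
        rw [htake]
        cases h : ws.take k with
        | nil =>
            exfalso
            rcases List.take_eq_nil_iff.mp h with h' | h'
            · omega
            · subst h'; simp at hlt
        | cons a l => simp
      rw [htail]
      simp only [List.reverse_append, List.reverse_cons, List.reverse_nil, List.nil_append,
        List.singleton_append]
      simp only [fitLoopA, altDrop]
      have hslice : PySem.List.slice ws (some 0) (some (k:Int)) = ws.take k := by
        simp [PySem.List.slice_to_natCast]
      have hsum : (ws.take (k+1)).sum = (ws.take k).sum + ws[k] := by
        rw [htake, List.sum_append]; simp
      have hT : (ws.take (k+1)).sum + (k : Int) - (ws[k] + 1)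
          = (ws.take k).sum + ((k : Int) - 1) := by
        rw [hsum]; ring
      have hK : ((k+1:Nat) : Int) - 1 = (k : Int) := hc
      rw [hT, hK, hslice]
      split_ifs with h1
      · rfl
      · have := ih hk (le_of_lt hlt)
        rw [PySem.List.slice_from_one] at this
        exact this

-- ===== VERDICT =====
theorem fit_columns_py_spec : Claim_equal_fit_columns_py := by
  intro ws mt _
  unfold Spec_fit_columns_py fit_columns_py fit_columns_py_alt
  by_cases h0 : ws.length = 0
  · simp [h0]
  · simp only [if_neg h0, altPhases, add_sub_assoc]
    split_ifs with h1 h2 h3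
    · rfl
    · rfl
    · exact (if_pos h3).symm
    · -- drop phase
      have hn : 1 ≤ ws.length := Nat.one_le_iff_ne_zero.mpr h0
      set capped2 := (ws.map (fun w => min w 12)).map (fun w => min w 8) with hcap
      have hlen : capped2.length = ws.length := by simp [hcap]
      rw [PySem.List.pyRange_neg_one_cons (by exact_mod_cast hn)]
      simp only [fitLoopA]
      have hslice : PySem.List.slice capped2 (some 0) (some (ws.length : Int)) = capped2 := by
        rw [PySem.List.slice_zero_start, PySem.List.slice_to_natCast, ← hlen, List.take_length]
      rw [hslice, if_neg (by exact_mod_cast h3)]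
      have hb := drop_bridge capped2 mt ws.length hn (le_of_eq hlen.symm)
      rw [← hlen, List.take_length, hlen] at hb
      rw [hb, if_neg h3]
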